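-- pv_equiv track=rewrite | github.com/Viktopia/notipus | app/core/utils/email_domain.py | is_hosted_email_domain
-- ===== SOURCE A (Python) =====
-- HOSTED_EMAIL_DOMAINS: frozenset[str] = frozenset(
--     {
--         "onmicrosoft.com",  # Azure AD / Microsoft 365
--         "mail.onmicrosoft.com",  # Microsoft 365 mail subdomain
--     }
-- )
--
-- def is_hosted_email_domain(domain: str) -> bool:
--     """Check if domain is a hosted email provider with tenant subdomains.
--
--     Hosted email domains are cloud providers (like Microsoft Azure AD) where
--     the subdomain represents the tenant/company name, not the actual company
--     website. For example, 'contoso.onmicrosoft.com' is a hosted domain where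
--     'contoso' is the tenant name.
--
--     Args:
--         domain: Domain to check (e.g., 'contoso.onmicrosoft.com').
--
--     Returns:
--         True if domain is a hosted email provider.
--     """
--     if not domain:
--         return False
--
--     domain_lower = domain.lower()
--
--     # Check if domain ends with any hosted email domain suffix
--     for hosted_domain in HOSTED_EMAIL_DOMAINS:
--         if domain_lower.endswith(f".{hosted_domain}"):
--             return True
--
--     return False
-- ===== SOURCE B (Python) =====
-- def is_hosted_email_domain(domain: str) -> bool:
--     labels = domain.lower().split(".")
--     return len(labels) >= 3 and labels[-2] == "onmicrosoft" and labels[-1] == "com"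
-- ===== Notes on version B (the rewrite author's own statement) =====
-- stated objective: idiomatic
-- what changed: B tokenizes the lowered domain into dot-separated labels and compares the two trailing labels (plus a length>=3 check for the mandatory tenant label), replacing A's loop of string-suffix tests against a frozenset of two suffixes (one of which subsumes the other).
import Mathlib
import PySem

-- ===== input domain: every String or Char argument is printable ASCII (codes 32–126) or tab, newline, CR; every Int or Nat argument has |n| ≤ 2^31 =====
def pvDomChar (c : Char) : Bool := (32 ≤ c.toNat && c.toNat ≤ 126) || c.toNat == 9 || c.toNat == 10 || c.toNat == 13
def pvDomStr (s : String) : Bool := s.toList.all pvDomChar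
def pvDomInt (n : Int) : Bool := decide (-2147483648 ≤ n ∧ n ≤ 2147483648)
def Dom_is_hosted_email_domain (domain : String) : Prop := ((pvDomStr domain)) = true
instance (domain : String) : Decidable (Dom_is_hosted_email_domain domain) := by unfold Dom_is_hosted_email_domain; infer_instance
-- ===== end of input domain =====

-- B replaces A's suffix-testing loop over a frozenset by splitting the lowered domain into
-- dot-separated labels and checking the two trailing labels (idiomatic; same O(n) cost).


-- ===== PORT A =====
-- HOSTED_EMAIL_DOMAINS (frozenset of two strings; iteration order does not affect the or-result)
def HOSTED_EMAIL_DOMAINS : List (List Char) := ["onmicrosoft.com".toList, "mail.onmicrosoft.com".toList]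

def is_hosted_email_domain (domain : String) : Bool :=
  if domain == "" then false
  else
    let domain_lower := PySem.Chars.lower domain.toList
    -- for hosted_domain in HOSTED_EMAIL_DOMAINS: if domain_lower.endswith(f".{hosted_domain}"): return True
    HOSTED_EMAIL_DOMAINS.any fun hosted_domain => PySem.Chars.endswith domain_lower ('.' :: hosted_domain)

-- ===== PORT B =====
def is_hosted_email_domain_alt (domain : String) : Bool :=
  let labels := PySem.Chars.splitOn (PySem.Chars.lower domain.toList) ['.']
  decide (3 ≤ labels.length) &&
    (PySem.List.pyGet? labels (-2) == some "onmicrosoft".toList) &&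
    (PySem.List.pyGet? labels (-1) == some "com".toList)

-- ===== PRECONDITION & SPEC =====
def Spec_is_hosted_email_domain (domain : String) (out : Bool) : Prop := out = is_hosted_email_domain_alt domain
instance (domain : String) (out : Bool) : Decidable (Spec_is_hosted_email_domain domain out) := by unfold Spec_is_hosted_email_domain; infer_instance

-- ===== CLAIM (what is proved, stated in full; the proofs are below) =====
def Claim_equal_is_hosted_email_domain : Prop := ∀ (domain : String), Dom_is_hosted_email_domain domain → Spec_is_hosted_email_domain domain (is_hosted_email_domain domain)

-- ===== LEMMAS AND PROOFS =====

-- proof-side model of str.split('.') : simple structural recursion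
def pvSplit : List Char → List (List Char)
  | [] => [[]]
  | c :: rest => if c = '.' then [] :: pvSplit rest else (pvSplit rest).modifyHead (c :: ·)

theorem pvSplit_dot (rest : List Char) : pvSplit ('.' :: rest) = [] :: pvSplit rest := by
  simp [pvSplit]

theorem pvSplit_cons (c : Char) (rest : List Char) (hc : c ≠ '.') :
    pvSplit (c :: rest) = (pvSplit rest).modifyHead (c :: ·) := by
  simp [pvSplit, hc]

theorem pvSplit_ne_nil (l : List Char) : pvSplit l ≠ [] := by
  induction l with
  | nil => simp [pvSplit]
  | cons c rest ih =>
    by_cases hc : c = '.'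
    · subst hc; rw [pvSplit_dot]; simp
    · rw [pvSplit_cons c rest hc]
      cases h : pvSplit rest with
      | nil => exact absurd h ih
      | cons a t => simp [List.modifyHead]

theorem pvSplit_go (fuel : Nat) : ∀ (l cur : List Char) (acc : List (List Char)), l.length < fuel →
    PySem.Chars.splitOn.go ['.'] fuel l cur acc = acc.reverse ++ (pvSplit l).modifyHead (cur.reverse ++ ·) := by
  induction fuel with
  | zero => intro l cur acc h; omega
  | succ f ih =>
    intro l cur acc h
    cases l with
    | nil => simp [PySem.Chars.splitOn.go, pvSplit]
    | cons c rest =>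
      by_cases hc : c = '.'
      · subst hc
        rw [PySem.Chars.splitOn.go]
        rw [if_pos (by simp [List.isPrefixOf])]
        simp only [List.length_singleton, List.drop_one, List.tail_cons]
        rw [ih rest [] (cur.reverse :: acc) (by simp at h; omega)]
        rw [pvSplit_dot]
        cases hp : pvSplit rest with
        | nil => exact absurd hp (pvSplit_ne_nil rest)
        | cons a t => simp [List.modifyHead]
      · rw [PySem.Chars.splitOn.go]
        rw [if_neg (by simp [List.isPrefixOf]; intro h'; exact hc h'.symm)]
        rw [ih rest (c :: cur) acc (by simp at h; omega)]
        rw [pvSplit_cons c rest hc]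
        cases hp : pvSplit rest with
        | nil => exact absurd hp (pvSplit_ne_nil rest)
        | cons a t => simp [List.modifyHead]

theorem splitOn_eq_pvSplit (l : List Char) : PySem.Chars.splitOn l ['.'] = pvSplit l := by
  rw [PySem.Chars.splitOn, pvSplit_go (l.length + 1) l [] [] (by omega)]
  cases hp : pvSplit l with
  | nil => exact absurd hp (pvSplit_ne_nil l)
  | cons a t => simp [List.modifyHead]

-- join ['.'] is a left inverse of pvSplit
theorem join_pvSplit (l : List Char) : PySem.Chars.join ['.'] (pvSplit l) = l := by
  induction l with
  | nil => simp [pvSplit, PySem.Chars.join_singleton]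
  | cons c rest ih =>
    by_cases hc : c = '.'
    · subst hc
      rw [pvSplit_dot]
      cases hp : pvSplit rest with
      | nil => exact absurd hp (pvSplit_ne_nil rest)
      | cons a t =>
        rw [PySem.Chars.join_cons_cons, ← hp, ih]
        simp
    · rw [pvSplit_cons c rest hc]
      cases hp : pvSplit rest with
      | nil => exact absurd hp (pvSplit_ne_nil rest)
      | cons a t =>
        rw [hp] at ih
        cases t with
        | nil =>
          simp only [List.modifyHead, PySem.Chars.join_singleton] at *
          rw [ih]
        | cons b t' =>
          simp only [List.modifyHead]
          rw [PySem.Chars.join_cons_cons] at *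
          rw [List.cons_append, List.cons_append]
          exact congrArg (List.cons c) ih

theorem pvSplit_append (a b : List Char) : pvSplit (a ++ '.' :: b) = pvSplit a ++ pvSplit b := by
  induction a with
  | nil => simp [pvSplit_dot, pvSplit]
  | cons c a' ih =>
    by_cases hc : c = '.'
    · subst hc
      rw [List.cons_append, pvSplit_dot, pvSplit_dot, ih]
      simp
    · rw [List.cons_append, pvSplit_cons c _ hc, pvSplit_cons c a' hc, ih]
      cases hp : pvSplit a' with
      | nil => exact absurd hp (pvSplit_ne_nil a')
      | cons x t => simp [List.modifyHead]

theorem join_append_two (ys : List (List Char)) (u v : List Char) (h : ys ≠ []) :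
    PySem.Chars.join ['.'] (ys ++ [u, v]) = PySem.Chars.join ['.'] ys ++ '.' :: (u ++ '.' :: v) := by
  induction ys with
  | nil => exact absurd rfl h
  | cons a t ih =>
    cases t with
    | nil =>
      simp only [List.nil_append, List.cons_append]
      rw [PySem.Chars.join_cons_cons, PySem.Chars.join_cons_cons, PySem.Chars.join_singleton,
        PySem.Chars.join_singleton]
      simp
    | cons b t' =>
      simp only [List.cons_append]
      rw [PySem.Chars.join_cons_cons, PySem.Chars.join_cons_cons,
        show b :: (t' ++ [u, v]) = (b :: t') ++ [u, v] from rfl, ih (by simp)]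
      simp

-- Python's labels[-2] / labels[-1] on a list that visibly ends in two elements
theorem pyGet_append_two {A : Type} (ys : List A) (u v : A) :
    PySem.List.pyGet? (ys ++ [u, v]) (-2) = some u ∧ PySem.List.pyGet? (ys ++ [u, v]) (-1) = some v := by
  have hlen : (ys ++ [u, v]).length = ys.length + 2 := by simp
  constructor
  · simp only [PySem.List.pyGet?, PySem.List.pyIdx?, hlen]
    rw [if_neg (by omega), if_pos (by push_cast; omega)]
    simp only [Option.bind_some]
    have : ys.length + 2 - (-(-2 : Int)).toNat = ys.length := by omega
    rw [this]
    rw [List.getElem?_append_right (by omega)]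
    simp
  · simp only [PySem.List.pyGet?, PySem.List.pyIdx?, hlen]
    rw [if_neg (by omega), if_pos (by push_cast; omega)]
    simp only [Option.bind_some]
    have : ys.length + 2 - (-(-1 : Int)).toNat = ys.length + 1 := by omega
    rw [this]
    rw [List.getElem?_append_right (by omega)]
    simp

-- the heart of the equivalence: suffix test ↔ trailing-label test, for any char list
theorem endswith_iff_labels (l : List Char) :
    PySem.Chars.endswith l ('.' :: "onmicrosoft.com".toList) =
      (decide (3 ≤ (pvSplit l).length) &&
        (PySem.List.pyGet? (pvSplit l) (-2) == some "onmicrosoft".toList) &&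
        (PySem.List.pyGet? (pvSplit l) (-1) == some "com".toList)) := by
  rw [Bool.eq_iff_iff]
  simp only [Bool.and_eq_true, decide_eq_true_eq, beq_iff_eq, PySem.Chars.endswith_iff]
  constructor
  · rintro ⟨p, hp⟩
    have hsplit : "onmicrosoft.com".toList = "onmicrosoft".toList ++ '.' :: "com".toList := by decide
    have hl : l = p ++ '.' :: "onmicrosoft.com".toList := hp.symm
    have hpv : pvSplit l = pvSplit p ++ ["onmicrosoft".toList, "com".toList] := by
      rw [hl, hsplit, pvSplit_append, pvSplit_append]
      congr 1
    have hg := pyGet_append_two (pvSplit p) "onmicrosoft".toList "com".toList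
    have hne := pvSplit_ne_nil p
    have hlen : 1 ≤ (pvSplit p).length := by
      cases h : pvSplit p with
      | nil => exact absurd h hne
      | cons a t => simp
    refine ⟨⟨?_, ?_⟩, ?_⟩
    · rw [hpv]; simp; omega
    · rw [hpv]; exact hg.1
    · rw [hpv]; exact hg.2
  · rintro ⟨⟨h3, h2⟩, h1⟩
    set L := pvSplit l with hL
    set n := L.length with hn
    have hi2 : L[n - 2]? = some "onmicrosoft".toList := by
      simp only [PySem.List.pyGet?, PySem.List.pyIdx?, ← hn] at h2
      rw [if_neg (by omega), if_pos (by omega)] at h2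
      simpa [show n - (-(-2 : Int)).toNat = n - 2 by omega] using h2
    have hi1 : L[n - 1]? = some "com".toList := by
      simp only [PySem.List.pyGet?, PySem.List.pyIdx?, ← hn] at h1
      rw [if_neg (by omega), if_pos (by omega)] at h1
      simpa [show n - (-(-1 : Int)).toNat = n - 1 by omega] using h1
    have hdrop : L.drop (n - 2) = ["onmicrosoft".toList, "com".toList] := by
      apply List.ext_getElem?
      intro i
      match i with
      | 0 => rw [List.getElem?_drop]; simpa using hi2
      | 1 => rw [List.getElem?_drop]; simpa [show n - 2 + 1 = n - 1 by omega] using hi1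
      | (k + 2) =>
        have e1 : (L.drop (n - 2))[k + 2]? = none := List.getElem?_eq_none (by simp only [List.length_drop]; omega)
        have e2 : (["onmicrosoft".toList, "com".toList] : List (List Char))[k + 2]? = none := List.getElem?_eq_none (by simp)
        rw [e1, e2]
    have hdec : L = L.take (n - 2) ++ ["onmicrosoft".toList, "com".toList] := by
      rw [← hdrop, List.take_append_drop]
    have htne : L.take (n - 2) ≠ [] := by
      have : (L.take (n - 2)).length = n - 2 := by simp only [List.length_take, ← hn]; omega
      intro hcontra
      rw [hcontra] at this
      simp at this
      omega
    have hjoin : l = PySem.Chars.join ['.'] L := (join_pvSplit l).symm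
    rw [hjoin, hdec, join_append_two _ _ _ htne]
    exact ⟨PySem.Chars.join ['.'] (L.take (n - 2)), by congr 1⟩

-- A's loop collapses to the single test against ".onmicrosoft.com"
theorem loop_collapse (l : List Char) :
    (HOSTED_EMAIL_DOMAINS.any fun hd => PySem.Chars.endswith l ('.' :: hd)) =
      PySem.Chars.endswith l ('.' :: "onmicrosoft.com".toList) := by
  simp only [HOSTED_EMAIL_DOMAINS, List.any_cons, List.any_nil, Bool.or_false]
  cases h1 : PySem.Chars.endswith l ('.' :: "onmicrosoft.com".toList) with
  | true => simp
  | false =>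
    simp only [Bool.false_or]
    cases h2 : PySem.Chars.endswith l ('.' :: "mail.onmicrosoft.com".toList) with
    | false => rfl
    | true =>
      exfalso
      have hs2 := (PySem.Chars.endswith_iff _ _).mp h2
      have : PySem.Chars.endswith l ('.' :: "onmicrosoft.com".toList) = true :=
        (PySem.Chars.endswith_iff _ _).mpr (List.IsSuffix.trans (by decide) hs2)
      rw [h1] at this
      exact Bool.false_ne_true this

-- ===== VERDICT (by name: the statement is the Claim_ definition above) =====
theorem is_hosted_email_domain_spec : Claim_equal_is_hosted_email_domain := by
  intro domain _
  unfold Spec_is_hosted_email_domain is_hosted_email_domain is_hosted_email_domain_alt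
  by_cases h0 : domain = ""
  · subst h0; decide
  · rw [if_neg (by simpa using h0)]
    simp only [splitOn_eq_pvSplit]
    rw [loop_collapse, endswith_iff_labels]
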